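-- pv_equiv track=rewrite | github.com/punk-r/BP-10-7-22 | support_functions.py | calculate_sector
-- ===== SOURCE A (Python) =====
-- def calculate_sector(call_No,site,position_in,The_field_size,The_field_start):
--     # na kolik casti se hriste deli
--     ratio = 3
--     # hrsite je v hre posunuto od souradnic [0,0] ,proto tento posun musime odcist
--     player_position = [ position_in[0] - The_field_start[0] , position_in[1] - The_field_start[1] + The_field_size[1] ]
--     feild_size =[ The_field_size[0] , The_field_size[1]]
--     sector_size = [ int(The_field_size[0] / ratio) ,int (The_field_size[1] / ratio)]
--
--     # vysledny format priklad: 12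
--     data = [0,0]
--     data[0] = player_position[0]//sector_size[0]  if site == "left" else 2 - player_position[0]//sector_size[0]
--     data[1] = player_position[1]//sector_size[1]  if site == "left" else 2 - player_position[1]//sector_size[1]
--
--     # error controla
--     for loop in range (0,2):
--         if data[loop] < 0:
--             data[loop] = str(0)
--         elif data[loop] > ratio:
--             data[loop] = str(ratio + 1)
--         else:
--             # + 1 ,zacina indexem 1 ne 0 jako pole
--             data[loop] = str(data[loop]+1)
--
--     new_field_size = [int(The_field_size[0] / ratio), int(The_field_size[1] / ratio)]
--     new_position_in =[int( position_in[0] + player_position[0]//sector_size[0] * sector_size[0]), \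
--                        int(position_in[1] -((2- player_position[1]//sector_size[1]) * sector_size[1]))]
--     new_field_start =[int(The_field_start[0] + player_position[0]//sector_size[0] * sector_size[0]), \
--                       int( The_field_start[1] -((2- player_position[1]//sector_size[1]) * sector_size[1]))]
--
--     # mezni podminka pro rekurzi
--     if call_No == 0:
--         sector = data[0] + data[1]
--     else:
--         sector = data[0] + data[1] + "." + calculate_sector(call_No - 1,site,position_in,new_field_size,new_field_start)
--     return sector
-- ===== SOURCE B (Python) =====
-- def calculate_sector(call_No, site, position_in, The_field_size, The_field_start):
--     # Iterative rewrite: one loop over levels with scalar state and a parts list, joined at the end.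
--     ratio = 3
--     pin0, pin1 = position_in[0], position_in[1]
--     fs0, fs1 = The_field_size[0], The_field_size[1]
--     st0, st1 = The_field_start[0], The_field_start[1]
--     parts = []
--     for _ in range(call_No + 1):
--         sec0 = int(fs0 / ratio)
--         sec1 = int(fs1 / ratio)
--         q0 = (pin0 - st0) // sec0
--         q1 = (pin1 - st1 + fs1) // sec1
--         d0 = q0 if site == "left" else 2 - q0
--         d1 = q1 if site == "left" else 2 - q1
--         seg = ""
--         for d in (d0, d1):
--             if d < 0:
--                 seg += "0"
--             elif d > ratio:
--                 seg += str(ratio + 1)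
--             else:
--                 seg += str(d + 1)
--         parts.append(seg)
--         st0 = st0 + q0 * sec0
--         st1 = st1 - (2 - q1) * sec1
--         fs0, fs1 = sec0, sec1
--     return ".".join(parts)
-- ===== Notes on version B (the rewrite author's own statement) =====
-- stated objective: simpler
-- what changed: Replaced A's self-recursion (which rebuilds 2-element field lists and an unused new_position_in each call) by a single iterative loop over levels carrying scalar field_size/field_start state and a parts list joined with '.' at the end.
import Mathlib
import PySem

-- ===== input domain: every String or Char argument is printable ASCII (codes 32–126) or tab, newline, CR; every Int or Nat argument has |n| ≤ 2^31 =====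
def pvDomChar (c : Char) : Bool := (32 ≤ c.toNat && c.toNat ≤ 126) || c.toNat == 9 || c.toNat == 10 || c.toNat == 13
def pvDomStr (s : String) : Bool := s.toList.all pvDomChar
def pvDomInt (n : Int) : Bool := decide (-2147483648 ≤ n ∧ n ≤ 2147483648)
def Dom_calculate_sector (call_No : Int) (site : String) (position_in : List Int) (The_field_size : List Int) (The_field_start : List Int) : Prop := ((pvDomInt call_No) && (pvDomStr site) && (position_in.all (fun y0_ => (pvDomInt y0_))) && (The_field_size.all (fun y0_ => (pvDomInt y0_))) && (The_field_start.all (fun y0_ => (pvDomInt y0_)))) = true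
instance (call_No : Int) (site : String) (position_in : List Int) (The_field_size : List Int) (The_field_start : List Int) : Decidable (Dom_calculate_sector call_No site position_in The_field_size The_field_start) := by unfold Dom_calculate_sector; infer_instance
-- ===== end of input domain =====

-- B replaces A's recursion by a single iterative loop over levels with scalar state and a
-- parts list joined at the end (same values; no unused new_position_in) — objective: simpler.

-- ===== PORT A =====
-- A's `for loop in range(0,2)` error-control branch, applied to one entry of data
def pvErrCtl_calculate_sector (d : Int) : String :=
  if d < 0 then PySem.Int.toStr 0
  else if d > 3 then PySem.Int.toStr (3 + 1)
  else PySem.Int.toStr (d + 1)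

-- fuel makes the recursion structural; `calculate_sector` supplies call_No.toNat + 1 fuel,
-- enough for every call_No ≥ 0 (Pre_ excludes call_No < 0, where the Python recurses forever).
-- int(x / 3) is ported as truncdiv (exact on Dom's |x| ≤ 2^31); xs[i] as pyGetD (Pre_ gives lengths ≥ 2).
def pvCalcA (fuel : Nat) (call_No : Int) (site : String) (position_in : List Int) (The_field_size : List Int) (The_field_start : List Int) : String :=
  match fuel with
  | 0 => ""  -- never reached when fuel = call_No.toNat + 1 and call_No ≥ 0
  | fuel + 1 =>
    let pp0 := PySem.List.pyGetD position_in 0 0 - PySem.List.pyGetD The_field_start 0 0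
    let pp1 := PySem.List.pyGetD position_in 1 0 - PySem.List.pyGetD The_field_start 1 0 + PySem.List.pyGetD The_field_size 1 0
    let sec0 := PySem.Int.truncdiv (PySem.List.pyGetD The_field_size 0 0) 3
    let sec1 := PySem.Int.truncdiv (PySem.List.pyGetD The_field_size 1 0) 3
    let d0 := if site == "left" then PySem.Int.floordiv pp0 sec0 else 2 - PySem.Int.floordiv pp0 sec0
    let d1 := if site == "left" then PySem.Int.floordiv pp1 sec1 else 2 - PySem.Int.floordiv pp1 sec1
    let s0 := pvErrCtl_calculate_sector d0
    let s1 := pvErrCtl_calculate_sector d1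
    let new_field_size := [sec0, sec1]
    let new_field_start := [PySem.List.pyGetD The_field_start 0 0 + PySem.Int.floordiv pp0 sec0 * sec0,
                            PySem.List.pyGetD The_field_start 1 0 - (2 - PySem.Int.floordiv pp1 sec1) * sec1]
    if call_No == 0 then s0 ++ s1
    else s0 ++ s1 ++ "." ++ pvCalcA fuel (call_No - 1) site position_in new_field_size new_field_start

def calculate_sector (call_No : Int) (site : String) (position_in : List Int) (The_field_size : List Int) (The_field_start : List Int) : String :=
  pvCalcA (call_No.toNat + 1) call_No site position_in The_field_size The_field_start

-- ===== PORT B =====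
-- B-side helper: one iteration of B's loop body (state = (st0, st1, fs0, fs1, parts))
def pvStepB (site : String) (pin0 pin1 : Int) (s : Int × Int × Int × Int × List String) :
    Int × Int × Int × Int × List String :=
  let (st0, st1, fs0, fs1, parts) := s
  let sec0 := PySem.Int.truncdiv fs0 3
  let sec1 := PySem.Int.truncdiv fs1 3
  let q0 := PySem.Int.floordiv (pin0 - st0) sec0
  let q1 := PySem.Int.floordiv (pin1 - st1 + fs1) sec1
  let d0 := if site == "left" then q0 else 2 - q0
  let d1 := if site == "left" then q1 else 2 - q1
  let seg := [d0, d1].foldl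
    (fun acc d =>
      if d < 0 then acc ++ "0"
      else if d > 3 then acc ++ PySem.Int.toStr (3 + 1)
      else acc ++ PySem.Int.toStr (d + 1)) ""
  (st0 + q0 * sec0, st1 - (2 - q1) * sec1, sec0, sec1, parts ++ [seg])

def calculate_sector_alt (call_No : Int) (site : String) (position_in : List Int) (The_field_size : List Int) (The_field_start : List Int) : String :=
  let pin0 := PySem.List.pyGetD position_in 0 0
  let pin1 := PySem.List.pyGetD position_in 1 0
  let st :=
    (PySem.List.pyRange 0 (call_No + 1) 1).foldl
      (fun s _ => pvStepB site pin0 pin1 s)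
      (PySem.List.pyGetD The_field_start 0 0, PySem.List.pyGetD The_field_start 1 0,
       PySem.List.pyGetD The_field_size 0 0, PySem.List.pyGetD The_field_size 1 0, [])
  PySem.Str.join "." st.2.2.2.2

-- ===== PRECONDITION & SPEC =====
-- Pre_ excludes exactly the inputs where the Python A does not return: call_No < 0 (the recursion
-- never terminates), lists too short for xs[0]/xs[1] (IndexError), and field sizes with
-- 3^(call_No+1) > |size| — written via Nat.log, call_No+1 ≤ log₃|size| ⟺ 3^(call_No+1) ≤ |size| —
-- where int(size/3) reaches 0 at some level and A raises ZeroDivisionError.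
def Pre_calculate_sector (call_No : Int) (site : String) (position_in : List Int) (The_field_size : List Int) (The_field_start : List Int) : Prop :=
  0 ≤ call_No ∧
  2 ≤ position_in.length ∧ 2 ≤ The_field_size.length ∧ 2 ≤ The_field_start.length ∧
  call_No.toNat + 1 ≤ Nat.log 3 (PySem.List.pyGetD The_field_size 0 0).natAbs ∧
  call_No.toNat + 1 ≤ Nat.log 3 (PySem.List.pyGetD The_field_size 1 0).natAbs

instance (call_No : Int) (site : String) (position_in : List Int) (The_field_size : List Int) (The_field_start : List Int) : Decidable (Pre_calculate_sector call_No site position_in The_field_size The_field_start) := by unfold Pre_calculate_sector; infer_instance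

def pvWitness_calculate_sector : Int × String × List Int × List Int × List Int :=
  (1, "left", [4, 5], [9, 9], [0, 0])

def Spec_calculate_sector (call_No : Int) (site : String) (position_in : List Int) (The_field_size : List Int) (The_field_start : List Int) (out : String) : Prop := out = calculate_sector_alt call_No site position_in The_field_size The_field_start
instance (call_No : Int) (site : String) (position_in : List Int) (The_field_size : List Int) (The_field_start : List Int) (out : String) : Decidable (Spec_calculate_sector call_No site position_in The_field_size The_field_start out) := by unfold Spec_calculate_sector; infer_instance

-- ===== CLAIM (what is proved, stated in full; the proofs are below) =====
def Claim_equal_calculate_sector : Prop := ∀ (call_No : Int) (site : String) (position_in : List Int) (The_field_size : List Int) (The_field_start : List Int), Dom_calculate_sector call_No site position_in The_field_size The_field_start → Pre_calculate_sector call_No site position_in The_field_size The_field_start → Spec_calculate_sector call_No site position_in The_field_size The_field_start (calculate_sector call_No site position_in The_field_size The_field_start)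

-- ===== LEMMAS AND PROOFS =====

-- one level's segment, shared reference form
def pvSeg (site : String) (pin0 pin1 fs1 st0 st1 sec0 sec1 : Int) : String :=
  let q0 := PySem.Int.floordiv (pin0 - st0) sec0
  let q1 := PySem.Int.floordiv (pin1 - st1 + fs1) sec1
  let d0 := if site == "left" then q0 else 2 - q0
  let d1 := if site == "left" then q1 else 2 - q1
  pvErrCtl_calculate_sector d0 ++ pvErrCtl_calculate_sector d1

-- the list of segments produced over levels 0..n, on scalar state
def pvSegList : Nat → String → Int → Int → Int → Int → Int → Int → List String
  | 0, site, pin0, pin1, fs0, fs1, st0, st1 =>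
      [pvSeg site pin0 pin1 fs1 st0 st1 (PySem.Int.truncdiv fs0 3) (PySem.Int.truncdiv fs1 3)]
  | m + 1, site, pin0, pin1, fs0, fs1, st0, st1 =>
      pvSeg site pin0 pin1 fs1 st0 st1 (PySem.Int.truncdiv fs0 3) (PySem.Int.truncdiv fs1 3) ::
        pvSegList m site pin0 pin1 (PySem.Int.truncdiv fs0 3) (PySem.Int.truncdiv fs1 3)
          (st0 + PySem.Int.floordiv (pin0 - st0) (PySem.Int.truncdiv fs0 3) * PySem.Int.truncdiv fs0 3)
          (st1 - (2 - PySem.Int.floordiv (pin1 - st1 + fs1) (PySem.Int.truncdiv fs1 3)) * PySem.Int.truncdiv fs1 3)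

theorem pvSegList_ne_nil (n : Nat) (site : String) (pin0 pin1 fs0 fs1 st0 st1 : Int) :
    pvSegList n site pin0 pin1 fs0 fs1 st0 st1 ≠ [] := by
  cases n <;> simp [pvSegList]

theorem pvJoin_cons (s : String) (rest : List String) (h : rest ≠ []) :
    PySem.Str.join "." (s :: rest) = s ++ "." ++ PySem.Str.join "." rest := by
  apply String.toList_inj.mp
  obtain ⟨r, rs, rfl⟩ := List.exists_cons_of_ne_nil h
  simp [PySem.Str.join, PySem.Chars.join_cons_cons]

theorem pvJoin_singleton (s : String) : PySem.Str.join "." [s] = s := by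
  apply String.toList_inj.mp
  simp [PySem.Str.join, PySem.Chars.join_singleton]

theorem pvGetD_pair0 (a b : Int) : PySem.List.pyGetD [a, b] 0 0 = a := rfl
theorem pvGetD_pair1 (a b : Int) : PySem.List.pyGetD [a, b] 1 0 = b := rfl

-- A side: with enough fuel, the recursion is the "." -join of pvSegList
theorem pvCalcA_eq_join (n : Nat) (site : String) (position_in The_field_size The_field_start : List Int) :
    pvCalcA (n + 1) (n : Int) site position_in The_field_size The_field_start =
      PySem.Str.join "." (pvSegList n site
        (PySem.List.pyGetD position_in 0 0) (PySem.List.pyGetD position_in 1 0)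
        (PySem.List.pyGetD The_field_size 0 0) (PySem.List.pyGetD The_field_size 1 0)
        (PySem.List.pyGetD The_field_start 0 0) (PySem.List.pyGetD The_field_start 1 0)) := by
  induction n generalizing The_field_size The_field_start with
  | zero =>
    simp [pvCalcA, pvSegList, pvSeg, pvJoin_singleton]
  | succ m ih =>
    have hne : ((m : Int) + 1 == 0) = false := by simp; omega
    have hsub : ((m : Int) + 1 - 1) = (m : Int) := by omega
    rw [pvCalcA.eq_def]
    simp only [Nat.cast_add, Nat.cast_one, hne, Bool.false_eq_true, if_false, hsub]
    rw [ih, pvGetD_pair0, pvGetD_pair1, pvGetD_pair0, pvGetD_pair1]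
    conv_rhs => rw [pvSegList]
    rw [pvJoin_cons _ _ (pvSegList_ne_nil _ _ _ _ _ _ _ _)]
    simp only [pvSeg]

-- B side: the loop body ignores the range element, so the foldl is a pure iteration
theorem pvFoldl_const {α β : Type} (g : α → α) (l : List β) (s : α) :
    l.foldl (fun a _ => g a) s = g^[l.length] s := by
  induction l generalizing s with
  | nil => rfl
  | cons x xs ih => simp [List.foldl_cons, ih, Function.iterate_succ_apply]

-- B's append-one-digit branch equals appending A's error-control string
theorem pvChunk_eq (acc : String) (d : Int) :
    (if d < 0 then acc ++ "0"
     else if d > 3 then acc ++ PySem.Int.toStr (3 + 1)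
     else acc ++ PySem.Int.toStr (d + 1)) = acc ++ pvErrCtl_calculate_sector d := by
  have h0 : PySem.Int.toStr 0 = "0" := by decide
  unfold pvErrCtl_calculate_sector
  split_ifs <;> simp [h0]

theorem pvStepB_eq (site : String) (pin0 pin1 st0 st1 fs0 fs1 : Int) (parts : List String) :
    pvStepB site pin0 pin1 (st0, st1, fs0, fs1, parts) =
      (st0 + PySem.Int.floordiv (pin0 - st0) (PySem.Int.truncdiv fs0 3) * PySem.Int.truncdiv fs0 3,
       st1 - (2 - PySem.Int.floordiv (pin1 - st1 + fs1) (PySem.Int.truncdiv fs1 3)) * PySem.Int.truncdiv fs1 3,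
       PySem.Int.truncdiv fs0 3, PySem.Int.truncdiv fs1 3,
       parts ++ [pvSeg site pin0 pin1 fs1 st0 st1 (PySem.Int.truncdiv fs0 3) (PySem.Int.truncdiv fs1 3)]) := by
  have hnil : ∀ t : String, "" ++ t = t := fun t => String.toList_inj.mp (by simp)
  simp only [pvStepB, pvSeg, List.foldl_cons, List.foldl_nil, pvChunk_eq, hnil]

-- B's iterated body appends exactly the pvSegList segments to the parts accumulator
theorem pvIterate_parts (site : String) (pin0 pin1 : Int) (k : Nat)
    (st0 st1 fs0 fs1 : Int) (parts : List String) :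
    ((pvStepB site pin0 pin1)^[k + 1] (st0, st1, fs0, fs1, parts)).2.2.2.2 =
      parts ++ pvSegList k site pin0 pin1 fs0 fs1 st0 st1 := by
  induction k generalizing st0 st1 fs0 fs1 parts with
  | zero =>
    rw [Function.iterate_one, pvStepB_eq, pvSegList]
  | succ m ih =>
    rw [Function.iterate_succ_apply, pvStepB_eq, ih, pvSegList]
    simp

-- ===== VERDICT (by name: the statement is the Claim_ definition above) =====
theorem calculate_sector_spec : Claim_equal_calculate_sector := by
  intro call_No site position_in The_field_size The_field_start _hDom hPre
  obtain ⟨h0, -, -, -, -, -⟩ := hPre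
  obtain ⟨n, rfl⟩ : ∃ n : Nat, call_No = (n : Int) := ⟨call_No.toNat, (Int.toNat_of_nonneg h0).symm⟩
  show _ = _
  unfold calculate_sector calculate_sector_alt
  have hn : ((n : Int)).toNat = n := by omega
  rw [hn, pvCalcA_eq_join]
  have hlen : (PySem.List.pyRange 0 ((n : Int) + 1) 1).length = n + 1 := by
    rw [PySem.List.length_pyRange_one]; omega
  simp only [pvFoldl_const, hlen, pvIterate_parts, List.nil_append]
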